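-- pv_equiv track=rewrite | github.com/jamais-vu/caesar-cipher | main.py | out_table_gen
-- ===== SOURCE A (Python) =====
-- def out_table_gen(n, alphabet):
--     '''Creates the
--
--     Each Unicode character has a corresponding "code point", given by ord().
--     We use this code point and n to determine the resultant shifted character.
--
--     For example, consider the charset 'ABCDEFGHIJKLMNOPQRSTUVWXYZ'.
--     The code points of the first character 'A" and the last character 'Z' are
--     ord('A') == 65 and ord('Z') == 90.
--     To shift a character c by n places we must "loop back" to 65, the beginning
--     of the alphabet. This is accomplished by treating the code point of the
--     first character as 0,
--
--     n: Integer, the number of characters to shift by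
--     charset: String, the character set to shift
--
--     Integer, String -> String
--     '''
--     shifted_alphabet = ''
--     first_code_point = ord(alphabet[0])
--     length = len(alphabet)
--     for char in alphabet:
--         shifted_code_point = (((ord(char) - first_code_point + n) % length)
--                              + first_code_point)
--         shifted_alphabet = shifted_alphabet + chr(shifted_code_point)
--     return shifted_alphabet
-- ===== SOURCE B (Python) =====
-- def out_table_gen(n, alphabet):
--     first_code_point = ord(alphabet[0])
--     length = len(alphabet)
--     codes = [chr(first_code_point + m) for m in range(length)]
--     r = n % length
--     wheel = codes[r:] + codes[:r]
--     return ''.join(wheel[(ord(c) - first_code_point) % length] for c in alphabet)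
-- ===== Notes on version B (the rewrite author's own statement) =====
-- stated objective: alternative
-- what changed: B builds the contiguous code-point sequence of the alphabet, rotates it once by n % length via slicing, and then maps each character to its entry in that rotated wheel by offset lookup, instead of A's per-character shift-formula loop with string concatenation.
import Mathlib
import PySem

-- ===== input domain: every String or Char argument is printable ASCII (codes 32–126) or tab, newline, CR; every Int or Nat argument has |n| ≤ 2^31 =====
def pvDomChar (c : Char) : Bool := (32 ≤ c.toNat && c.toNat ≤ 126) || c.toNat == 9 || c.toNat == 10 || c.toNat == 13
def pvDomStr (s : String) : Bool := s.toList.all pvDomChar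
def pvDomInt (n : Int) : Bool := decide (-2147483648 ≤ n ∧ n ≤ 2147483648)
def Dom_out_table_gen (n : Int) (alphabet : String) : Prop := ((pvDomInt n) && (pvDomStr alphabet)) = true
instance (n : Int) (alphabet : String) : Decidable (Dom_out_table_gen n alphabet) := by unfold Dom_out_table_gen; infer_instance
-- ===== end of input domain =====

-- B realizes the shift as a list rotation: it builds the contiguous code sequence, rotates it
-- by n % length via slicing, and maps each character to its wheel entry by offset lookup,
-- instead of A's per-character shift formula with string concatenation (objective: alternative).
-- Pre_ excludes only the empty alphabet, on which A raises IndexError at alphabet[0].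


-- ===== PORT A =====
-- chr(x) is ported as Char.ofNat x.toNat: on the admitted inputs the shifted code point is
-- a nonnegative int, so .toNat is exact.
def out_table_gen (n : Int) (alphabet : String) : String :=
  match alphabet.toList with
  | [] => ""  -- unreachable under Pre_: Python raises IndexError on alphabet[0]
  | c0 :: _ =>
    String.mk (alphabet.toList.foldl
      (fun acc ch =>
        acc ++ [Char.ofNat (PySem.Int.mod ((ch.toNat : Int) - (c0.toNat : Int) + n)
                  (alphabet.toList.length : Int) + (c0.toNat : Int)).toNat])
      [])

-- ===== PORT B =====
def out_table_gen_alt (n : Int) (alphabet : String) : String :=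
  match alphabet.toList with
  | [] => ""  -- unreachable under Pre_: Python raises IndexError on alphabet[0]
  | c0 :: _ =>
    let first : Int := c0.toNat
    let length : Int := alphabet.toList.length
    let codes : List Char := (PySem.List.pyRange 0 length 1).map (fun m => Char.ofNat (first + m).toNat)
    let r : Int := PySem.Int.mod n length
    let wheel : List Char := PySem.List.slice codes (some r) none ++ PySem.List.slice codes none (some r)
    -- wheel[(ord(c)-first) % length]: the index is provably in range, so the .getD default is unreachable
    String.mk (alphabet.toList.map (fun c =>
      (PySem.List.pyGet? wheel (PySem.Int.mod ((c.toNat : Int) - first) length)).getD c))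

-- ===== PRECONDITION & SPEC =====
-- Pre_ excludes only the empty alphabet, on which A (and B) raise IndexError at alphabet[0].
def Pre_out_table_gen (n : Int) (alphabet : String) : Prop := alphabet ≠ ""
instance (n : Int) (alphabet : String) : Decidable (Pre_out_table_gen n alphabet) := by unfold Pre_out_table_gen; infer_instance
def pvWitness_out_table_gen : Int × String := (3, "ABCDE")

def Spec_out_table_gen (n : Int) (alphabet : String) (out : String) : Prop := out = out_table_gen_alt n alphabet
instance (n : Int) (alphabet : String) (out : String) : Decidable (Spec_out_table_gen n alphabet out) := by unfold Spec_out_table_gen; infer_instance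

-- ===== CLAIM (what is proved, stated in full; the proofs are below) =====
def Claim_equal_out_table_gen : Prop := ∀ (n : Int) (alphabet : String), Dom_out_table_gen n alphabet → Pre_out_table_gen n alphabet → Spec_out_table_gen n alphabet (out_table_gen n alphabet)

-- ===== LEMMAS AND PROOFS =====

-- the per-character fact specific to these two programs: B's wheel lookup equals A's shift formula
theorem pvWheel_lookup (n first L : Int) (hL : 0 < L) (k : Int) (d : Char) :
    (PySem.List.pyGet?
        (PySem.List.slice ((PySem.List.pyRange 0 L 1).map (fun m => Char.ofNat (first + m).toNat))
            (some (PySem.Int.mod n L)) none ++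
         PySem.List.slice ((PySem.List.pyRange 0 L 1).map (fun m => Char.ofNat (first + m).toNat))
            none (some (PySem.Int.mod n L)))
        (PySem.Int.mod (k - first) L)).getD d
      = Char.ofNat (PySem.Int.mod (k - first + n) L + first).toNat := by
  set g : Int → Char := fun m => Char.ofNat (first + m).toNat with hg
  set codes : List Char := (PySem.List.pyRange 0 L 1).map g with hcodes
  have hclen : codes.length = L.toNat := by
    simp [hcodes, PySem.List.length_pyRange_one]
  rw [PySem.Int.mod_eq_emod_of_pos hL, PySem.Int.mod_eq_emod_of_pos hL,
      PySem.Int.mod_eq_emod_of_pos hL]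
  have hr0 : 0 ≤ n % L := Int.emod_nonneg n (by omega)
  have hrL : n % L < L := Int.emod_lt_of_pos n hL
  have hi0 : 0 ≤ (k - first) % L := Int.emod_nonneg _ (by omega)
  have hiL : (k - first) % L < L := Int.emod_lt_of_pos _ hL
  rw [PySem.List.slice_from codes hr0, PySem.List.slice_to codes hr0,
      ← List.rotate_eq_drop_append_take (by omega : (n % L).toNat ≤ codes.length)]
  have hlt : ((k - first) % L).toNat < (codes.rotate (n % L).toNat).length := by
    rw [List.length_rotate, hclen]; omega
  rw [PySem.List.pyGet?_of_nonneg_of_lt _ hi0 (by rw [List.length_rotate, hclen]; omega),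
      List.getElem?_eq_getElem hlt, Option.getD_some, List.getElem_rotate]
  have hmlt : (((k - first) % L).toNat + (n % L).toNat) % codes.length < L.toNat := by
    rw [hclen]; exact Nat.mod_lt _ (by omega)
  rw [List.getElem_map, PySem.List.getElem_pyRange_one]
  simp only [hg, zero_add]
  have hM : ((((((k - first) % L).toNat + (n % L).toNat) % codes.length) : Nat) : Int)
      = (k - first + n) % L := by
    rw [hclen, Int.natCast_mod]
    push_cast
    rw [Int.toNat_of_nonneg hi0, Int.toNat_of_nonneg hr0, Int.toNat_of_nonneg hL.le,
        ← Int.add_emod]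
  rw [hM, Int.add_comm]

-- ===== VERDICT (by name: the statement is the Claim_ definition above) =====
theorem out_table_gen_spec : Claim_equal_out_table_gen := by
  intro n alphabet _ hpre
  unfold Spec_out_table_gen out_table_gen out_table_gen_alt
  cases h : alphabet.toList with
  | nil => exact absurd (by cases alphabet; simpa using h) hpre
  | cons c0 rest =>
    simp only []
    rw [PySem.List.foldl_append_singleton_eq_map]
    congr 1
    apply List.map_congr_left
    intro c hc
    have hL : (0 : Int) < ((c0 :: rest).length : Int) := by simp
    exact (pvWheel_lookup n (c0.toNat : Int) ((c0 :: rest).length : Int) hL (c.toNat : Int) c).symm
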